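-- pv_equiv track=rewrite | github.com/tramy1258/dynamic-system-program-synthesis | src/main.py | program_bank_dict_by_size
-- ===== SOURCE A (Python) =====
-- def program_bank_dict_by_size(program_bank):
--     program_bank_dict = dict()
--     for pg,s,_ in program_bank:
--         if s not in program_bank_dict:
--             program_bank_dict[s] = [pg]
--         else:
--             program_bank_dict[s] += [pg]
--     return program_bank_dict
-- ===== SOURCE B (Python) =====
-- def program_bank_dict_by_size(program_bank):
--     # two-phase: collect distinct sizes in first-appearance order, then fill each bucket by filtering
--     sizes = []
--     seen = set()
--     for _, s, _ in program_bank: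
--         if s not in seen:
--             seen.add(s)
--             sizes.append(s)
--     return {s: [pg for pg, s2, _ in program_bank if s2 == s] for s in sizes}
-- ===== Notes on version B (the rewrite author's own statement) =====
-- stated objective: alternative
-- what changed: Replaced the single accumulating dict loop by a two-phase scheme: one pass collects the distinct sizes in first-appearance order, then each bucket is built by a filtering pass over the bank.
import Mathlib
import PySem

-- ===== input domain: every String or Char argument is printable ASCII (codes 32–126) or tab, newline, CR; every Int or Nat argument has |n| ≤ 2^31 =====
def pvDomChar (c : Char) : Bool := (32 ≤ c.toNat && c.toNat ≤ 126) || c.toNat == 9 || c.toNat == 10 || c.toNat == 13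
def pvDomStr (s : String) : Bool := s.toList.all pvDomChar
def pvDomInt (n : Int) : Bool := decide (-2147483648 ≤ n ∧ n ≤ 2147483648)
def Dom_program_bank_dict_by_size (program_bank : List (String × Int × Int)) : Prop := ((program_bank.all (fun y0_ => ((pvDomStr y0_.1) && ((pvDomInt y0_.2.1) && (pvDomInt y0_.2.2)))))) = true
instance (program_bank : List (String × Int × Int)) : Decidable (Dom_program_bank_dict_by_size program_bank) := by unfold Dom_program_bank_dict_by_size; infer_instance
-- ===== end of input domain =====

-- ===== PORT A =====
-- A: one loop accumulating a dict size -> list of programs (returned as its items list).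
def program_bank_dict_by_size (program_bank : List (String × Int × Int)) : List (Int × List String) :=
  (program_bank.foldl (fun d p =>
      if d.contains p.2.1 = false then d.insert p.2.1 [p.1]
      else d.insert p.2.1 (d.getD p.2.1 [] ++ [p.1])) PySem.Dict.empty).items

-- ===== PORT B =====
-- B: phase 1 collects the distinct sizes in first-appearance order (Source B keeps a list `sizes`
-- and a set `seen` in lockstep; PySem.Set is exactly that ordered distinct list), phase 2 builds
-- each bucket by filtering the bank.
def program_bank_dict_by_size_alt (program_bank : List (String × Int × Int)) : List (Int × List String) :=
  (program_bank.foldl (fun seen p => PySem.Set.add seen p.2.1) ([] : PySem.Set Int)).map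
    (fun s => (s, (program_bank.filter (fun p => p.2.1 == s)).map (·.1)))

-- ===== PRECONDITION & SPEC =====
def Spec_program_bank_dict_by_size (program_bank : List (String × Int × Int)) (out : List (Int × List String)) : Prop := out = program_bank_dict_by_size_alt program_bank
instance (program_bank : List (String × Int × Int)) (out : List (Int × List String)) : Decidable (Spec_program_bank_dict_by_size program_bank out) := by unfold Spec_program_bank_dict_by_size; infer_instance

-- ===== CLAIM (what is proved, stated in full; the proofs are below) =====
def Claim_equal_program_bank_dict_by_size : Prop := ∀ (program_bank : List (String × Int × Int)), Dom_program_bank_dict_by_size program_bank → Spec_program_bank_dict_by_size program_bank (program_bank_dict_by_size program_bank)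

-- ===== LEMMAS AND PROOFS =====

-- A's step function (insert, branching on membership) is pointwise the dict `modify` step.
theorem pv_stepA_eq_modify :
    (fun (d : PySem.Dict Int (List String)) (p : String × Int × Int) =>
      if d.contains p.2.1 = false then d.insert p.2.1 [p.1]
      else d.insert p.2.1 (d.getD p.2.1 [] ++ [p.1]))
    = (fun d p => d.modify p.2.1 [] (· ++ [p.1])) := by
  funext d p
  by_cases h : d.contains p.2.1 = false
  · simp [h, PySem.Dict.modify, PySem.Dict.getD_of_not_contains d [] h]
  · simp [h, PySem.Dict.modify]

theorem program_bank_dict_by_size_spec : Claim_equal_program_bank_dict_by_size := by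
  intro pb _
  show program_bank_dict_by_size pb = program_bank_dict_by_size_alt pb
  unfold program_bank_dict_by_size program_bank_dict_by_size_alt
  rw [pv_stepA_eq_modify]
  -- rewrite A's fold as a fold over the (size, program) pairs
  have hfold :
      pb.foldl (fun (d : PySem.Dict Int (List String)) p => d.modify p.2.1 [] (· ++ [p.1]))
        PySem.Dict.empty
      = (pb.map (fun p => (p.2.1, p.1))).foldl
          (fun d q => d.modify q.1 [] (· ++ [q.2])) PySem.Dict.empty := by
    rw [List.foldl_map]
  rw [hfold]
  set F := (pb.map (fun p => (p.2.1, p.1))).foldl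
      (fun (d : PySem.Dict Int (List String)) q => d.modify q.1 [] (· ++ [q.2]))
      PySem.Dict.empty with hF
  have hnodup : F.keys.Nodup := by
    rw [hF]
    exact PySem.Dict.nodup_keys_foldl_modify_key (pb.map (fun p => (p.2.1, p.1)))
      (fun q => q.1) [] (fun d q => (· ++ [q.2])) PySem.Dict.empty (by simp)
  have hkeys : F.keys = PySem.Set.ofList (pb.map (fun p => p.2.1)) := by
    rw [hF, PySem.Dict.keys_foldl_modify_key]
    simp [PySem.Set.update_nil_left, List.map_map, Function.comp_def]
  have hsizes : pb.foldl (fun seen p => PySem.Set.add seen p.2.1) ([] : PySem.Set Int)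
      = PySem.Set.ofList (pb.map (fun p => p.2.1)) := by
    rw [← PySem.Set.update_map_eq_foldl_add, PySem.Set.update_nil_left]
  have hget : ∀ c : Int, F.getD c [] = (pb.filter (fun p => p.2.1 == c)).map (·.1) := by
    intro c
    rw [hF, PySem.Dict.getD_foldl_modify_append]
    simp [List.filter_map, Function.comp_def]
  rw [PySem.Dict.items_eq_map_keys F hnodup [], hkeys, hsizes]
  refine List.map_congr_left ?_
  intro s _
  simp [hget s]
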